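-- pv_equiv track=rewrite | github.com/Ouisal-ben-zahi/tap2 | python/B3/interview_routes.py | remove_bonjour_prefix
-- ===== SOURCE A (Python) =====
-- def remove_bonjour_prefix(text: str) -> str:
--     """
--     Supprime un « Bonjour » redondant au début des questions générées.
--     Utilisé pour éviter que chaque question écrite commence par une salutation.
--     """
--     if not text:
--         return text
--
--     original = text
--     stripped = text.lstrip()
--     lower = stripped.lower()
--
--     prefixes = [
--         "bonjour ",
--         "bonjour,",
--         "bonjour.",
--         "bonjour!",
--         "bonjour !",
--     ]
--
--     for prefix in prefixes:
--         if lower.startswith(prefix):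
--             # Retirer le préfixe et nettoyer les espaces / ponctuation juste après
--             stripped = stripped[len(prefix):].lstrip(" ,.-\n")
--             break
--
--     # Conserver la mise en forme d'origine autant que possible
--     return stripped if stripped else original
-- ===== SOURCE B (Python) =====
-- def remove_bonjour_prefix(text: str) -> str:
--     """Same cleanup without the prefix-list loop: lower only the first 8
--     characters once and test them against 'bonjour' + one delimiter."""
--     if not text:
--         return text
--     s = text.lstrip()
--     head = s[:8].lower()
--     if head[:7] == "bonjour" and head[7:] in (" ", ",", ".", "!"):
--         s = s[8:].lstrip(" ,.-\n")
--     return s if s else text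
-- ===== Notes on version B (the rewrite author's own statement) =====
-- stated objective: simpler
-- what changed: Replaces A's five-prefix list and startswith loop (which lowercases the whole string) by a single test: lowercase only the first 8 characters and compare them against the greeting word followed by one delimiter character.
import Mathlib
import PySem

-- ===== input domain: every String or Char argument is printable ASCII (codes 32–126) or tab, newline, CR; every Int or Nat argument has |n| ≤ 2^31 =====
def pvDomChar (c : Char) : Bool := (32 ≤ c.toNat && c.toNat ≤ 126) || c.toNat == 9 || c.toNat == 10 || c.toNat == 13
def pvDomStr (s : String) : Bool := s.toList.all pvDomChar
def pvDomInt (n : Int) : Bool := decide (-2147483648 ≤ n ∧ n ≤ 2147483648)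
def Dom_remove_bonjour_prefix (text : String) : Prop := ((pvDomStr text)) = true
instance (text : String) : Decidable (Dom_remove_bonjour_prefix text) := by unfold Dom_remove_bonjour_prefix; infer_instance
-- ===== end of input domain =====

-- B replaces A's five-prefix loop by one lowered 8-char head compared against 'bonjour' + a delimiter class (simpler; return value only).

-- ===== PORT A =====

-- s.lstrip(chars): drop leading characters belonging to the given set (exact port of Python's str.lstrip(chars))
def pyLstripChars (s chars : List Char) : List Char :=
  s.dropWhile (fun c => chars.contains c)

-- the literal prefix list of A
def bonjourPrefixes : List (List Char) :=
  ["bonjour ".toList, "bonjour,".toList, "bonjour.".toList, "bonjour!".toList, "bonjour !".toList]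

-- the for-loop with break: first prefix of the list that matches, if any
def firstBonjourMatch (lower : List Char) : List (List Char) → Option (List Char)
  | [] => none
  | p :: ps => if PySem.Chars.startswith lower p then some p else firstBonjourMatch lower ps

def remove_bonjour_prefix (text : String) : String :=
  if text = "" then text
  else
    let original := text
    let stripped := PySem.Chars.lstrip text.toList
    let lower := PySem.Chars.lower stripped
    let stripped :=
      match firstBonjourMatch lower bonjourPrefixes with
      | some p => pyLstripChars (PySem.List.slice stripped (some (p.length : Int)) none) " ,.-\n".toList
      | none => stripped
    if stripped ≠ [] then String.ofList stripped else original

-- ===== PORT B =====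
def remove_bonjour_prefix_alt (text : String) : String :=
  if text = "" then text
  else
    let s := PySem.Chars.lstrip text.toList
    let head := PySem.Chars.lower (PySem.List.slice s none (some 8))
    let s :=
      if PySem.List.slice head none (some 7) = "bonjour".toList ∧
         PySem.List.slice head (some 7) none ∈ [" ".toList, ",".toList, ".".toList, "!".toList]
      then pyLstripChars (PySem.List.slice s (some 8) none) " ,.-\n".toList
      else s
    if s ≠ [] then String.ofList s else text

-- ===== PRECONDITION & SPEC =====
def Spec_remove_bonjour_prefix (text : String) (out : String) : Prop := out = remove_bonjour_prefix_alt text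
instance (text : String) (out : String) : Decidable (Spec_remove_bonjour_prefix text out) := by unfold Spec_remove_bonjour_prefix; infer_instance

-- ===== CLAIM (what is proved, stated in full; the proofs are below) =====
def Claim_equal_remove_bonjour_prefix : Prop := ∀ (text : String), Dom_remove_bonjour_prefix text → Spec_remove_bonjour_prefix text (remove_bonjour_prefix text)

-- ===== LEMMAS AND PROOFS =====

-- the core: on the already-lstripped character list, A's loop and B's head test agree
theorem core_eq (l : List Char) :
    (match firstBonjourMatch (PySem.Chars.lower l) bonjourPrefixes with
      | some p => pyLstripChars (PySem.List.slice l (some (p.length : Int)) none) " ,.-\n".toList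
      | none => l)
    = (if PySem.List.slice (PySem.Chars.lower (PySem.List.slice l none (some 8))) none (some 7) = "bonjour".toList ∧
          PySem.List.slice (PySem.Chars.lower (PySem.List.slice l none (some 8))) (some 7) none ∈ [" ".toList, ",".toList, ".".toList, "!".toList]
       then pyLstripChars (PySem.List.slice l (some 8) none) " ,.-\n".toList
       else l) := by
  have hmt : ∀ n : Nat, PySem.Chars.lower (l.take n) = (PySem.Chars.lower l).take n := by
    intro n; simp [PySem.Chars.lower, List.map_take]
  simp only [show ((8:Int)) = ((8:Nat):Int) by norm_num, show ((7:Int)) = ((7:Nat):Int) by norm_num,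
    PySem.List.slice_to_natCast, PySem.List.slice_from_natCast, hmt]
  set m := PySem.Chars.lower l with hm
  have htt : (m.take 8).take 7 = m.take 7 := by
    rw [List.take_take]; norm_num
  have hsplit : m.take 8 = m.take 7 ++ (m.take 8).drop 7 := by
    conv_lhs => rw [← List.take_append_drop 7 (m.take 8)]
    rw [htt]
  have pref8 : ∀ p : List Char, p.length = 8 → (p <+: m ↔ m.take 8 = p) := by
    intro p hp
    rw [List.prefix_iff_eq_take, hp, eq_comm]
  by_cases hc : m.take 7 = ['b','o','n','j','o','u','r'] ∧
      (m.take 8).drop 7 ∈ [[' '], [','], ['.'], ['!']]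
  · obtain ⟨h7, hd⟩ := hc
    have ht8 : ∀ d : Char, (m.take 8).drop 7 = [d] → m.take 8 = ['b','o','n','j','o','u','r'] ++ [d] := by
      intro d hdd; rw [hsplit, h7, hdd]
    simp only [List.mem_cons, List.not_mem_nil, or_false] at hd
    rcases hd with hd | hd | hd | hd
    · have h1 : ['b','o','n','j','o','u','r',' '] <+: m := by
        rw [pref8 _ (by decide), ht8 ' ' hd]; decide
      simp [firstBonjourMatch, bonjourPrefixes, PySem.Chars.startswith,
        List.isPrefixOf_iff_prefix, h1, htt, h7, hd]
    · have h8 : m.take 8 = ['b','o','n','j','o','u','r',','] := ht8 ',' hd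
      have h2 : ['b','o','n','j','o','u','r',','] <+: m := by
        rw [pref8 _ (by decide)]; exact h8
      have h1 : ¬ (['b','o','n','j','o','u','r',' '] <+: m) := by
        rw [pref8 _ (by decide), h8]; decide
      simp [firstBonjourMatch, bonjourPrefixes, PySem.Chars.startswith,
        List.isPrefixOf_iff_prefix, h1, h2, htt, h7, hd]
    · have h8 : m.take 8 = ['b','o','n','j','o','u','r','.'] := ht8 '.' hd
      have h3 : ['b','o','n','j','o','u','r','.'] <+: m := by
        rw [pref8 _ (by decide)]; exact h8
      have h1 : ¬ (['b','o','n','j','o','u','r',' '] <+: m) := by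
        rw [pref8 _ (by decide), h8]; decide
      have h2 : ¬ (['b','o','n','j','o','u','r',','] <+: m) := by
        rw [pref8 _ (by decide), h8]; decide
      simp [firstBonjourMatch, bonjourPrefixes, PySem.Chars.startswith,
        List.isPrefixOf_iff_prefix, h1, h2, h3, htt, h7, hd]
    · have h8 : m.take 8 = ['b','o','n','j','o','u','r','!'] := ht8 '!' hd
      have h4 : ['b','o','n','j','o','u','r','!'] <+: m := by
        rw [pref8 _ (by decide)]; exact h8
      have h1 : ¬ (['b','o','n','j','o','u','r',' '] <+: m) := by
        rw [pref8 _ (by decide), h8]; decide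
      have h2 : ¬ (['b','o','n','j','o','u','r',','] <+: m) := by
        rw [pref8 _ (by decide), h8]; decide
      have h3 : ¬ (['b','o','n','j','o','u','r','.'] <+: m) := by
        rw [pref8 _ (by decide), h8]; decide
      simp [firstBonjourMatch, bonjourPrefixes, PySem.Chars.startswith,
        List.isPrefixOf_iff_prefix, h1, h2, h3, h4, htt, h7, hd]
  · have hcontra : ∀ d : Char, (d = ' ' ∨ d = ',' ∨ d = '.' ∨ d = '!') →
        ¬ ((['b','o','n','j','o','u','r'] ++ [d]) <+: m) := by
      intro d hdset hpre
      rw [pref8 _ (by simp)] at hpre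
      apply hc
      constructor
      · rw [← htt, hpre, List.take_left' (by decide)]
      · rw [hpre, List.drop_left' (by decide)]
        rcases hdset with rfl | rfl | rfl | rfl <;> simp
    have h1 : ¬ (['b','o','n','j','o','u','r',' '] <+: m) := hcontra ' ' (by decide)
    have h2 : ¬ (['b','o','n','j','o','u','r',','] <+: m) := hcontra ',' (by decide)
    have h3 : ¬ (['b','o','n','j','o','u','r','.'] <+: m) := hcontra '.' (by decide)
    have h4 : ¬ (['b','o','n','j','o','u','r','!'] <+: m) := hcontra '!' (by decide)
    have h5 : ¬ (['b','o','n','j','o','u','r',' ','!'] <+: m) := by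
      intro hpre
      exact h1 (List.IsPrefix.trans (by decide) hpre)
    have hc' : ¬ (m.take 7 = ['b','o','n','j','o','u','r'] ∧
        ((m.take 8).drop 7 = [' '] ∨ (m.take 8).drop 7 = [','] ∨
         (m.take 8).drop 7 = ['.'] ∨ (m.take 8).drop 7 = ['!'])) := by
      intro h; exact hc ⟨h.1, by rcases h.2 with h | h | h | h <;> simp [h]⟩
    simp [firstBonjourMatch, bonjourPrefixes, PySem.Chars.startswith,
      List.isPrefixOf_iff_prefix, h1, h2, h3, h4, h5, htt, hc']

-- ===== VERDICT (by name: the statement is the Claim_ definition above) =====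
theorem remove_bonjour_prefix_spec : Claim_equal_remove_bonjour_prefix := by
  intro text _
  unfold Spec_remove_bonjour_prefix remove_bonjour_prefix remove_bonjour_prefix_alt
  by_cases h : text = ""
  · simp [h]
  · simp only [h, if_false]
    rw [core_eq]
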